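-- pv_equiv track=rewrite | github.com/adhimiw/ai-tutor | dspy-service/utils/metrics.py | _analyze_complexity_trend
-- ===== SOURCE A (Python) =====
-- from typing import Dict, List, Any, Optional
--
-- def _analyze_complexity_trend(session_data: List[Dict]) -> str:
--     """Analyze how question complexity changes over the session"""
--
--     if len(session_data) < 3:
--         return "insufficient_data"
--
--     # Simple analysis based on message length and question words
--     complexities = []
--
--     for interaction in session_data:
--         message = interaction.get("user_message", "")
--         complexity = len(message.split()) + message.count("?") * 2
--         complexities.append(complexity)
--
--     if len(complexities) >= 3:
--         if complexities[-1] > complexities[0]: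
--             return "increasing"
--         elif complexities[-1] < complexities[0]:
--             return "decreasing"
--         else:
--             return "stable"
--
--     return "stable"
-- ===== SOURCE B (Python) =====
-- def _analyze_complexity_trend(session_data):
--     """Score only the first and last interactions; the middle ones never affect the result."""
--     if len(session_data) < 3:
--         return "insufficient_data"
--
--     def score(interaction):
--         message = interaction.get("user_message", "")
--         return len(message.split()) + 2 * message.count("?")
--
--     first = score(session_data[0])
--     last = score(session_data[-1])
--     if first < last:
--         return "increasing"
--     elif last < first:
--         return "decreasing"
--     else:
--         return "stable"
-- ===== Notes on version B (the rewrite author's own statement) =====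
-- stated objective: simpler
-- what changed: B drops the full pass that builds a complexity list for every interaction and computes the score only for session_data[0] and session_data[-1], comparing the two scalars directly.
import Mathlib
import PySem

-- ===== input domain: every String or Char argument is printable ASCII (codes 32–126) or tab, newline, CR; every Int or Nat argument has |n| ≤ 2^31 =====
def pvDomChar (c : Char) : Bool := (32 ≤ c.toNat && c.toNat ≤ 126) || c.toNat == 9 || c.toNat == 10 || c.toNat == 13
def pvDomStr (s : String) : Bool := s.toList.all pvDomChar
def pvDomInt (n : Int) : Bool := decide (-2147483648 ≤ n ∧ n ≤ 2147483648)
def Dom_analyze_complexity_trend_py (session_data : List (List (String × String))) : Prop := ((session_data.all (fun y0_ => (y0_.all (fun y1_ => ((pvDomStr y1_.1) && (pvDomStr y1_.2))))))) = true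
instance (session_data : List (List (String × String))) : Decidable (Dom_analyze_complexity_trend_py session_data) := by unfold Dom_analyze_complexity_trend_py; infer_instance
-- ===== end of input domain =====

-- B replaces A's full pass (a complexity score per interaction) by scoring only the first and
-- last interactions and comparing the two scalars; the middle interactions are never scored.
-- ===== PORT A =====
-- literal transliteration of A: build the whole complexities list with a loop, then compare ends
def analyze_complexity_trend_py (session_data : List (List (String × String))) : String :=
  if session_data.length < 3 then "insufficient_data"
  else
    let complexities : List Nat := session_data.foldl (fun acc interaction =>
      let message := PySem.Dict.getD (PySem.Dict.mk interaction) "user_message" ""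
      acc ++ [(PySem.Str.split₀ message).length + (PySem.Str.count message "?") * 2]) []
    if complexities.length ≥ 3 then
      if (PySem.List.pyGetD complexities (-1) 0) > (PySem.List.pyGetD complexities 0 0) then "increasing"
      else if (PySem.List.pyGetD complexities (-1) 0) < (PySem.List.pyGetD complexities 0 0) then "decreasing"
      else "stable"
    else "stable"

-- ===== PORT B =====
-- B's helper: the complexity score of one interaction
def pvScore (interaction : List (String × String)) : Nat :=
  let message := PySem.Dict.getD (PySem.Dict.mk interaction) "user_message" ""
  (PySem.Str.split₀ message).length + 2 * (PySem.Str.count message "?")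

def analyze_complexity_trend_py_alt (session_data : List (List (String × String))) : String :=
  if session_data.length < 3 then "insufficient_data"
  else
    let first := pvScore (PySem.List.pyGetD session_data 0 [])
    let last := pvScore (PySem.List.pyGetD session_data (-1) [])
    if first < last then "increasing"
    else if last < first then "decreasing"
    else "stable"

-- ===== PRECONDITION & SPEC =====
def Spec_analyze_complexity_trend_py (session_data : List (List (String × String))) (out : String) : Prop := out = analyze_complexity_trend_py_alt session_data
instance (session_data : List (List (String × String))) (out : String) : Decidable (Spec_analyze_complexity_trend_py session_data out) := by unfold Spec_analyze_complexity_trend_py; infer_instance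

-- ===== CLAIM (what is proved, stated in full; the proofs are below) =====
def Claim_equal_analyze_complexity_trend_py : Prop := ∀ (session_data : List (List (String × String))), Dom_analyze_complexity_trend_py session_data → Spec_analyze_complexity_trend_py session_data (analyze_complexity_trend_py session_data)

-- ===== LEMMAS AND PROOFS =====

-- ===== VERDICT (by name: the statement is the Claim_ definition above) =====
theorem pvGet?_map {α β : Type} (f : α → β) (l : List α) (i : Int) :
    PySem.List.pyGet? (l.map f) i = (PySem.List.pyGet? l i).map f := by
  simp [PySem.List.pyGet?]

theorem pvGetD_map_of_isSome {α β : Type} (f : α → β) (l : List α) (i : Int) (d : β) (d' : α)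
    (h : (PySem.List.pyGet? l i).isSome) :
    PySem.List.pyGetD (l.map f) i d = f (PySem.List.pyGetD l i d') := by
  unfold PySem.List.pyGetD
  rw [pvGet?_map]
  cases hx : PySem.List.pyGet? l i with
  | none => rw [hx] at h; simp at h
  | some a => simp

theorem pvGet?_isSome_of_lt {α : Type} (l : List α) (h : 3 ≤ l.length) :
    (PySem.List.pyGet? l 0).isSome ∧ (PySem.List.pyGet? l (-1)).isSome := by
  match l, h with
  | a :: rest, _ =>
    constructor
    · simp [PySem.List.pyGet?, PySem.List.pyIdx?]
    · simp [PySem.List.pyGet?, PySem.List.pyIdx?]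

theorem analyze_complexity_trend_py_spec : Claim_equal_analyze_complexity_trend_py := by
  intro session_data _
  unfold Spec_analyze_complexity_trend_py
  unfold analyze_complexity_trend_py analyze_complexity_trend_py_alt
  by_cases h : session_data.length < 3
  · simp [h]
  · simp only [h, if_false]
    have h3 : 3 ≤ session_data.length := by omega
    rw [PySem.List.foldl_append_singleton_eq_map]
    simp only [List.nil_append, List.length_map]
    have hg := pvGet?_isSome_of_lt session_data h3
    set f : List (String × String) → Nat := fun interaction =>
      let message := PySem.Dict.getD (PySem.Dict.mk interaction) "user_message" ""
      (PySem.Str.split₀ message).length + (PySem.Str.count message "?") * 2 with hf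
    have e0 : PySem.List.pyGetD (session_data.map f) 0 0
        = pvScore (PySem.List.pyGetD session_data 0 []) := by
      rw [pvGetD_map_of_isSome f session_data 0 0 [] hg.1]
      simp [hf, pvScore, Nat.mul_comm]
    have e1 : PySem.List.pyGetD (session_data.map f) (-1) 0
        = pvScore (PySem.List.pyGetD session_data (-1) []) := by
      rw [pvGetD_map_of_isSome f session_data (-1) 0 [] hg.2]
      simp [hf, pvScore, Nat.mul_comm]
    simp only [ge_iff_le, h3, if_true, e0, e1]
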